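-- pv_equiv track=rewrite | github.com/matsuda-tkm/debug-master | agents/app.py | extract_error_info
-- ===== SOURCE A (Python) =====
-- def extract_error_info(log: str) -> str:
--     """
--     実行ログからエラー情報を抽出し、簡潔に整形します。
--     完全なログではなく、重要なエラーメッセージのみを返します。
--     """
--     # エラーの行を抽出（Pythonの一般的なエラーパターン）
--     error_lines = []
--     lines = log.split("\n")
--     error_started = False
--     for line in lines:
--         if "Error:" in line or "Exception:" in line or "Traceback" in line:
--             error_started = True
--         if error_started:
--             error_lines.append(line)
--             # エラースタックトレースの終わりを検出
--             if (
--                 line.strip()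
--                 and not line.startswith(" ")
--                 and 'File "' not in line
--                 and "Traceback" not in line
--             ):
--                 return "\n".join(error_lines)
--     # エラーパターンが見つからない場合は、ログの後半部分を返す
--     if not error_lines and log:
--         return "\n".join(lines[-10:])
--     return "\n".join(error_lines)
-- ===== SOURCE B (Python) =====
-- def extract_error_info(log: str) -> str:
--     """Locate-then-slice re-implementation: find the first error-pattern line,
--     then find the first terminator line after it, and join the slice."""
--     lines = log.split("\n")
--
--     def is_pattern(line):
--         return "Error:" in line or "Exception:" in line or "Traceback" in line
--
--     def is_terminator(line):
--         return (
--             bool(line.strip())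
--             and not line.startswith(" ")
--             and 'File "' not in line
--             and "Traceback" not in line
--         )
--
--     start = next((i for i, line in enumerate(lines) if is_pattern(line)), None)
--     if start is None:
--         return "\n".join(lines[-10:]) if log else ""
--     tail = lines[start:]
--     stop = next((i for i, line in enumerate(tail) if is_terminator(line)), None)
--     if stop is None:
--         return "\n".join(tail)
--     return "\n".join(tail[: stop + 1])
-- ===== Notes on version B (the rewrite author's own statement) =====
-- stated objective: simpler
-- what changed: Replaced A's single fused stateful loop (error_started flag, growing accumulator, mid-loop early return) by two independent scans: find the index of the first error-pattern line, then the first terminator line after it, and join the corresponding slice.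
import Mathlib
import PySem

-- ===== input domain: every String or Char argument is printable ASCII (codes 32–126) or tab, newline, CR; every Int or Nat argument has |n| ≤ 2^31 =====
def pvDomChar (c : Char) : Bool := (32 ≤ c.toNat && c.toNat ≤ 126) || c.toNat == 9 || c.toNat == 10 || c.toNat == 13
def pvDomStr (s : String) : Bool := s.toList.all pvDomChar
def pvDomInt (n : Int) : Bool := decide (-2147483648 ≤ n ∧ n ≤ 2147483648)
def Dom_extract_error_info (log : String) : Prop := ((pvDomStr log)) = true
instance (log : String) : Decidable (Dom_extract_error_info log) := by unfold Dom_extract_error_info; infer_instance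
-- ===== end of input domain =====

-- B restructures A's fused stateful loop into locate-then-slice passes; same return value everywhere.

-- shared predicates (both Pythons test these literal conditions)
def pvIsPattern (line : String) : Bool :=
  PySem.Str.isIn "Error:" line || PySem.Str.isIn "Exception:" line || PySem.Str.isIn "Traceback" line

def pvIsTerminator (line : String) : Bool :=
  !(PySem.Str.strip line == "") && !(PySem.Str.startswith line " ")
    && !(PySem.Str.isIn "File \"" line) && !(PySem.Str.isIn "Traceback" line)

-- ===== PORT A =====
-- the for-loop of A: state = (error_started, error_lines); returns (early-return value?, final error_lines)
def pvLoopA : List String → Bool → List String → Option String × List String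
  | [], _, acc => (none, acc)
  | l :: rest, started, acc =>
    let started := started || pvIsPattern l
    if started then
      let acc := acc ++ [l]
      if pvIsTerminator l then (some (PySem.Str.join "\n" acc), acc)
      else pvLoopA rest started acc
    else pvLoopA rest started acc

def extract_error_info (log : String) : String :=
  let lines := (PySem.Str.split? log "\n").getD []
  match pvLoopA lines false [] with
  | (some r, _) => r
  | (none, acc) =>
    if acc == [] && !(log == "") then
      PySem.Str.join "\n" (PySem.List.slice lines (some (-10)) none)
    else PySem.Str.join "\n" acc

-- ===== PORT B =====
def extract_error_info_alt (log : String) : String :=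
  let lines := (PySem.Str.split? log "\n").getD []
  match lines.findIdx? pvIsPattern with
  | none =>
    if log == "" then "" else PySem.Str.join "\n" (PySem.List.slice lines (some (-10)) none)
  | some start =>
    let tail := lines.drop start
    match tail.findIdx? pvIsTerminator with
    | none => PySem.Str.join "\n" tail
    | some stop => PySem.Str.join "\n" (tail.take (stop + 1))

-- ===== PRECONDITION & SPEC =====
def Spec_extract_error_info (log : String) (out : String) : Prop := out = extract_error_info_alt log
instance (log : String) (out : String) : Decidable (Spec_extract_error_info log out) := by unfold Spec_extract_error_info; infer_instance

-- ===== CLAIM (what is proved, stated in full; the proofs are below) =====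
def Claim_equal_extract_error_info : Prop := ∀ (log : String), Dom_extract_error_info log → Spec_extract_error_info log (extract_error_info log)

-- ===== LEMMAS AND PROOFS =====

-- once started, the loop appends lines up to and including the first terminator
theorem pvLoopA_started (ls : List String) : ∀ acc : List String,
    pvLoopA ls true acc =
      match ls.findIdx? pvIsTerminator with
      | some i => (some (PySem.Str.join "\n" (acc ++ ls.take (i + 1))), acc ++ ls.take (i + 1))
      | none => (none, acc ++ ls) := by
  induction ls with
  | nil => intro acc; simp [pvLoopA]
  | cons l rest ih =>
    intro acc
    by_cases h : pvIsTerminator l = true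
    · simp [pvLoopA, List.findIdx?_cons, h]
    · simp only [Bool.not_eq_true] at h
      simp [pvLoopA, List.findIdx?_cons, h, ih]
      cases hr : rest.findIdx? pvIsTerminator with
      | none => simp
      | some i => simp

-- before any pattern line, the loop skips ahead to the first pattern line
theorem pvLoopA_unstarted (ls : List String) :
    pvLoopA ls false [] =
      match ls.findIdx? pvIsPattern with
      | none => (none, ([] : List String))
      | some s => pvLoopA (ls.drop s) true [] := by
  induction ls with
  | nil => simp [pvLoopA]
  | cons l rest ih =>
    by_cases h : pvIsPattern l = true
    · simp [pvLoopA, List.findIdx?_cons, h]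
    · simp only [Bool.not_eq_true] at h
      simp [pvLoopA, List.findIdx?_cons, h, ih]
      cases hr : rest.findIdx? pvIsPattern with
      | none => rfl
      | some s => rfl

theorem drop_ne_nil_of_findIdx {α : Type} (p : α → Bool) (ls : List α) (s : Nat)
    (h : ls.findIdx? p = some s) : ls.drop s ≠ [] := by
  have hlt : s < ls.length := (List.findIdx?_eq_some_iff_findIdx_eq.mp h).1
  simp [List.drop_eq_nil_iff]; omega

-- ===== VERDICT (by name: the statement is the Claim_ definition above) =====
theorem extract_error_info_spec : Claim_equal_extract_error_info := by
  intro log _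
  unfold Spec_extract_error_info extract_error_info extract_error_info_alt
  simp only [pvLoopA_unstarted]
  cases hp : ((PySem.Str.split? log "\n").getD []).findIdx? pvIsPattern with
  | none =>
    simp only
    by_cases hlog : log = ""
    · simp [hlog, PySem.Str.join]
    · simp [hlog]
  | some s =>
    simp only [pvLoopA_started]
    have hne : ((PySem.Str.split? log "\n").getD []).drop s ≠ [] := drop_ne_nil_of_findIdx _ _ _ hp
    cases ht : (((PySem.Str.split? log "\n").getD []).drop s).findIdx? pvIsTerminator with
    | none => simp [hne]
    | some i => simp
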